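-- pv_equiv track=rewrite | github.com/anyakors/minion_scripts | quad_train/threshold_alg.py | drop_occurence
-- ===== SOURCE A (Python) =====
-- def drop_occurence(signals, freq_threshold):
--     k = 0 #last change
--     last = 0 #last value
--     drops = []
--     for i in range(0,len(signals)):
--         if signals[i]==last and last==-1:
--             current = i-k #length of constant value
--             if current<freq_threshold:
--                 drops.append(0)
--             else:
--                 drops.append(1)
--         else:
--             current = 0
--             last = signals[i]
--             k = i
--             drops.append(0)
--     return drops
-- ===== SOURCE B (Python) =====
-- def drop_occurence(signals, freq_threshold):
--     # runs-then-positions decomposition: split into maximal runs of equal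
--     # values; a run of -1 emits 0 then [offset >= freq_threshold] flags,
--     # any other run emits zeros.
--     out = []
--     i = 0
--     n = len(signals)
--     while i < n:
--         v = signals[i]
--         j = i + 1
--         while j < n and signals[j] == v:
--             j += 1
--         L = j - i
--         if v == -1:
--             out.append(0)
--             for off in range(1, L):
--                 out.append(1 if off >= freq_threshold else 0)
--         else:
--             out.extend([0] * L)
--         i = j
--     return out
-- ===== Notes on version B (the rewrite author's own statement) =====
-- stated objective: alternative
-- what changed: Replaces A's single pass with k/last state bookkeeping by an explicit runs-then-positions decomposition: scan out each maximal run of equal values, then emit its output (0 then offset>=threshold flags for -1 runs, zeros otherwise).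
import Mathlib
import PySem

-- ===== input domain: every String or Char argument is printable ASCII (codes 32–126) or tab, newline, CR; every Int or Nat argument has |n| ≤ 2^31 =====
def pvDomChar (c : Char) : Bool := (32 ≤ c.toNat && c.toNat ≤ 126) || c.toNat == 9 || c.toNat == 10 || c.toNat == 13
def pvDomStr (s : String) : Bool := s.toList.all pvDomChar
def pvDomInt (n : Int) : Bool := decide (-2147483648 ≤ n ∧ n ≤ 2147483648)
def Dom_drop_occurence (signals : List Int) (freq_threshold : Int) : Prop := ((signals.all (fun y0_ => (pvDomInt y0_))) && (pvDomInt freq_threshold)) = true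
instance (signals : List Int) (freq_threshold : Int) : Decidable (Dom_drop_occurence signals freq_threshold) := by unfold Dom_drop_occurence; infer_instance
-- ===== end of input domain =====

-- B replaces A's one-pass k/last index bookkeeping by an explicit runs-then-positions
-- decomposition (objective: alternative, same cost).


-- ===== PORT A =====
-- A's for-loop over i in range(len(signals)) as the obvious structural recursion
-- consuming the list while carrying the same state (i, k, last, drops).
def dropOccGoA (t : Int) : List Int → Int → Int → Int → List Int → List Int
  | [], _, _, _, drops => drops
  | x :: xs, i, k, last, drops =>
    if x = last ∧ last = -1 then
      -- current = i - k
      if i - k < t then dropOccGoA t xs (i + 1) k last (drops ++ [0])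
      else dropOccGoA t xs (i + 1) k last (drops ++ [1])
    else
      dropOccGoA t xs (i + 1) i x (drops ++ [0])

def drop_occurence (signals : List Int) (freq_threshold : Int) : List Int :=
  dropOccGoA freq_threshold signals 0 0 0 []

-- ===== PORT B =====
-- length of the leading run of value v in a list (B's inner while loop)
def dropOccRunLen (v : Int) : List Int → Nat
  | [] => 0
  | x :: xs => if x = v then dropOccRunLen v xs + 1 else 0

-- B's outer while loop: peel the leading maximal run, emit its output, recurse.
def dropOccGoB (t : Int) : List Int → List Int
  | [] => []
  | x :: xs =>
    let m := dropOccRunLen x xs          -- run length L = m + 1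
    (if x = -1 then
      0 :: (PySem.List.pyRange 1 ((m : Int) + 1) 1).map (fun off => if off ≥ t then (1 : Int) else 0)
    else
      List.replicate (m + 1) 0) ++ dropOccGoB t (xs.drop m)
termination_by l => l.length
decreasing_by simp

def drop_occurence_alt (signals : List Int) (freq_threshold : Int) : List Int :=
  dropOccGoB freq_threshold signals

-- ===== PRECONDITION & SPEC =====
def Spec_drop_occurence (signals : List Int) (freq_threshold : Int) (out : List Int) : Prop := out = drop_occurence_alt signals freq_threshold
instance (signals : List Int) (freq_threshold : Int) (out : List Int) : Decidable (Spec_drop_occurence signals freq_threshold out) := by unfold Spec_drop_occurence; infer_instance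

-- ===== CLAIM (what is proved, stated in full; the proofs are below) =====
def Claim_equal_drop_occurence : Prop := ∀ (signals : List Int) (freq_threshold : Int), Dom_drop_occurence signals freq_threshold → Spec_drop_occurence signals freq_threshold (drop_occurence signals freq_threshold)

-- ===== LEMMAS AND PROOFS =====

-- Pure reference form of A's loop: state = (last value, offset c = i - k of the
-- current element within the current run).
def dropOccG (t : Int) : List Int → Int → Int → List Int
  | [], _, _ => []
  | x :: xs, last, c =>
    if x = last ∧ last = -1 then
      (if c < t then 0 else 1) :: dropOccG t xs last (c + 1)
    else
      0 :: dropOccG t xs x 1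

theorem dropOccGoA_eq_G (t : Int) : ∀ (l : List Int) (i k last : Int) (drops : List Int),
    dropOccGoA t l i k last drops = drops ++ dropOccG t l last (i - k) := by
  intro l
  induction l with
  | nil => intro i k last drops; simp [dropOccGoA, dropOccG]
  | cons x xs ih =>
    intro i k last drops
    by_cases h : x = last ∧ last = -1
    · simp only [dropOccGoA, dropOccG, if_pos h]
      by_cases hc : i - k < t
      · rw [if_pos hc, if_pos hc, ih]
        have : i + 1 - k = i - k + 1 := by omega
        simp [this]
      · rw [if_neg hc, if_neg hc, ih]
        have : i + 1 - k = i - k + 1 := by omega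
        simp [this]
    · simp only [dropOccGoA, dropOccG, if_neg h]
      rw [ih]
      have : i + 1 - i = 1 := by omega
      simp [this]

-- the element after the leading run of v differs from v
theorem dropOccRunLen_drop_head (v : Int) : ∀ (xs : List Int),
    ∀ y ∈ (xs.drop (dropOccRunLen v xs)).head?, y ≠ v := by
  intro xs
  induction xs with
  | nil => simp [dropOccRunLen]
  | cons x xs ih =>
    by_cases h : x = v
    · simpa [dropOccRunLen, h] using ih
    · simp [dropOccRunLen, h]

-- a run of a non-(-1) value emits zeros and preserves state (last = v, c = 1)
theorem dropOccG_run_ne (t : Int) : ∀ (xs : List Int) (v : Int), v ≠ -1 →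
    dropOccG t xs v 1 =
      List.replicate (dropOccRunLen v xs) 0 ++ dropOccG t (xs.drop (dropOccRunLen v xs)) v 1 := by
  intro xs
  induction xs with
  | nil => intro v _; simp [dropOccRunLen]
  | cons x l ih =>
    intro v hv
    by_cases h : x = v
    · have hcond : ¬ (x = v ∧ v = -1) := fun hc => hv hc.2
      simp only [dropOccRunLen, if_pos h, dropOccG, if_neg hcond]
      subst h
      rw [ih x hv]
      simp [List.replicate_succ]
    · simp [dropOccRunLen, h]

-- a run of -1 (continuing, offsets c, c+1, …) emits threshold flags
theorem dropOccG_run_neg (t : Int) : ∀ (xs : List Int) (c : Int),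
    dropOccG t xs (-1) c =
      (List.range (dropOccRunLen (-1) xs)).map
          (fun (j : Nat) => if t ≤ c + (j : Int) then (1 : Int) else 0)
        ++ dropOccG t (xs.drop (dropOccRunLen (-1) xs)) (-1) (c + (dropOccRunLen (-1) xs : Int)) := by
  intro xs
  induction xs with
  | nil => intro c; simp [dropOccRunLen, dropOccG]
  | cons x l ih =>
    intro c
    by_cases h : x = (-1 : Int)
    · subst h
      have hm : dropOccRunLen (-1) ((-1 : Int) :: l) = dropOccRunLen (-1) l + 1 := by
        simp [dropOccRunLen]
      rw [hm, List.range_succ_eq_map, List.map_cons, List.map_map, List.drop_succ_cons]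
      have hG : dropOccG t ((-1 : Int) :: l) (-1) c
          = (if c < t then (0 : Int) else 1) :: dropOccG t l (-1) (c + 1) := by
        simp [dropOccG]
      rw [hG, ih (c + 1), List.cons_append]
      congr 1
      · split_ifs with h1 h2 h2 <;> push_cast at * <;> omega
      congr 1
      · apply List.map_congr_left
        intro j _
        simp only [Function.comp_apply]
        apply if_congr _ rfl rfl
        push_cast
        omega
      · congr 1
        push_cast
        ring
    · simp [dropOccRunLen, h, dropOccG]

-- A's reference form equals B's runs decomposition whenever the head does not
-- continue a -1 run carried in by the state.
theorem dropOccG_eq_GoB (t : Int) : ∀ (n : Nat) (l : List Int) (last c : Int),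
    l.length ≤ n →
    (∀ x ∈ l.head?, ¬ (x = last ∧ last = -1)) →
    dropOccG t l last c = dropOccGoB t l := by
  intro n
  induction n with
  | zero =>
    intro l last c hn _
    have : l = [] := by cases l <;> simp_all
    subst this
    rw [dropOccGoB]
    simp [dropOccG]
  | succ n ih =>
    intro l last c hn hhead
    cases l with
    | nil => rw [dropOccGoB]; simp [dropOccG]
    | cons x xs =>
      have hcond : ¬ (x = last ∧ last = -1) := hhead x (by simp)
      rw [dropOccGoB]
      simp only [dropOccG, if_neg hcond]
      by_cases hx : x = (-1 : Int)
      · subst hx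
        rw [if_pos rfl, dropOccG_run_neg t xs 1]
        rw [ih (xs.drop (dropOccRunLen (-1) xs)) (-1) (1 + (dropOccRunLen (-1) xs : Int))
              (by simp at hn ⊢; omega)
              (by intro y hy hc; exact dropOccRunLen_drop_head (-1) xs y hy hc.1)]
        simp only [List.cons_append]
        congr 1
        rw [PySem.List.pyRange_one]
        have h1 : (((dropOccRunLen (-1) xs : Int) + 1) - 1).toNat = dropOccRunLen (-1) xs := by
          omega
        rw [h1, List.map_map]
        congr 1
      · rw [if_neg hx, dropOccG_run_ne t xs x hx]
        rw [ih (xs.drop (dropOccRunLen x xs)) x 1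
              (by simp at hn ⊢; omega)
              (by intro y hy hc; exact hx hc.2)]
        simp [List.replicate_succ]

-- ===== VERDICT (by name: the statement is the Claim_ definition above) =====
theorem drop_occurence_spec : Claim_equal_drop_occurence := by
  intro signals t _
  unfold Spec_drop_occurence drop_occurence drop_occurence_alt
  rw [dropOccGoA_eq_G]
  simp only [List.nil_append, sub_self]
  exact dropOccG_eq_GoB t signals.length signals 0 0 le_rfl
    (fun x _ hc => absurd hc.2 (by norm_num))
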